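-- pv_equiv track=rewrite | github.com/ola-893/chorus-auth | backend/src/prediction_engine/pattern_detector.py | detect_byzantine_behavior
-- ===== SOURCE A (Python) =====
-- from typing import List, Dict, Any, Set, Optional
--
-- def detect_byzantine_behavior(agent_id: str, history: List[Dict]) -> bool:
--     """
--     Detect inconsistent/Byzantine behavior.
--     Criterion: Alternating between cooperation (positive score) and conflict (negative score).
--     """
--     if len(history) < 4:
--         return False
--
--     # Check for sign flips in score adjustments
--     flips = 0
--     for i in range(1, len(history)):
--         prev = history[i-1].get('adjustment', 0)
--         curr = history[i].get('adjustment', 0)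
--         if (prev > 0 and curr < 0) or (prev < 0 and curr > 0):
--             flips += 1
--
--     # High volatility in behavior
--     return flips >= 3
-- ===== SOURCE B (Python) =====
-- def detect_byzantine_behavior(agent_id: str, history) -> bool:
--     if len(history) < 4:
--         return False
--     # Run-length encode the sign sequence of the adjustments: one entry per
--     # maximal run of records with the same sign.
--     runs = []
--     for h in history:
--         a = h.get('adjustment', 0)
--         s = (a > 0) - (a < 0)
--         if not runs or runs[-1] != s:
--             runs.append(s)
--     # Consecutive runs always carry different signs, so a boundary between two
--     # nonzero runs is exactly one sign flip of the original sequence.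
--     flips = sum(1 for a, b in zip(runs, runs[1:]) if a and b)
--     return flips >= 3
-- ===== Notes on version B (the rewrite author's own statement) =====
-- stated objective: alternative
-- what changed: B run-length encodes the adjustment sign sequence into maximal same-sign runs and then counts run boundaries whose two runs are both nonzero (each such boundary is exactly one sign flip), instead of A's index loop comparing every consecutive pair of raw adjustments.
import Mathlib
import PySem

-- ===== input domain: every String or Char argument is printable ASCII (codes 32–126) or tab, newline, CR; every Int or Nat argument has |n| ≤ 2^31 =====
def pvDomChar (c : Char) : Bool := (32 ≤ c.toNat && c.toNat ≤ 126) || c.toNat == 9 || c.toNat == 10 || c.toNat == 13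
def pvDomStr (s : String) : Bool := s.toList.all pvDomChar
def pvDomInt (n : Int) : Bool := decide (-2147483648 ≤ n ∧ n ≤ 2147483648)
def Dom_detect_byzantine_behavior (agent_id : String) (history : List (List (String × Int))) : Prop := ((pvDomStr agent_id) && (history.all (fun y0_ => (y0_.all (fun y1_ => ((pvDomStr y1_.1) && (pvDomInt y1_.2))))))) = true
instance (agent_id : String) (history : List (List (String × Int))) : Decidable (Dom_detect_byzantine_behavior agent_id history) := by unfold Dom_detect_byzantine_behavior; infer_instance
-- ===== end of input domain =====

-- B run-length encodes the adjustment sign sequence and counts nonzero-run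
-- boundaries instead of comparing every consecutive raw pair; same O(n) cost.

-- ===== PORT A =====
-- history[i-1] / history[i] with i from range(1, len(history)) is always in range,
-- so pyGetD with default [] is exact here.
def detect_byzantine_behavior (agent_id : String) (history : List (List (String × Int))) : Bool :=
  if history.length < 4 then false
  else
    let flips : Int := (PySem.List.pyRange 1 (history.length : Int) 1).foldl
      (fun flips i =>
        let prev := PySem.Dict.getD (PySem.Dict.mk (PySem.List.pyGetD history (i - 1) [])) "adjustment" 0
        let curr := PySem.Dict.getD (PySem.Dict.mk (PySem.List.pyGetD history i [])) "adjustment" 0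
        if (prev > 0 ∧ curr < 0) ∨ (prev < 0 ∧ curr > 0) then flips + 1 else flips) 0
    decide (flips ≥ 3)

-- ===== PORT B =====
-- (a > 0) - (a < 0): Python's bool-arithmetic sign trick
def pySignB (a : Int) : Int := (if a > 0 then 1 else 0) - (if a < 0 then 1 else 0)

def detect_byzantine_behavior_alt (agent_id : String) (history : List (List (String × Int))) : Bool :=
  if history.length < 4 then false
  else
    let runs : List Int := history.foldl (fun runs h =>
      let a := PySem.Dict.getD (PySem.Dict.mk h) "adjustment" 0
      let s := pySignB a
      if runs = [] ∨ runs.getLast? ≠ some s then runs ++ [s] else runs) []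
    let flips : Int := (runs.zip runs.tail).foldl
      (fun c p => if p.1 ≠ 0 ∧ p.2 ≠ 0 then c + 1 else c) 0
    decide (flips ≥ 3)

-- ===== PRECONDITION & SPEC =====
def Spec_detect_byzantine_behavior (agent_id : String) (history : List (List (String × Int))) (out : Bool) : Prop := out = detect_byzantine_behavior_alt agent_id history
instance (agent_id : String) (history : List (List (String × Int))) (out : Bool) : Decidable (Spec_detect_byzantine_behavior agent_id history out) := by unfold Spec_detect_byzantine_behavior; infer_instance

-- ===== CLAIM (what is proved, stated in full; the proofs are below) =====
def Claim_equal_detect_byzantine_behavior : Prop := ∀ (agent_id : String) (history : List (List (String × Int))), Dom_detect_byzantine_behavior agent_id history → Spec_detect_byzantine_behavior agent_id history (detect_byzantine_behavior agent_id history)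

-- ===== LEMMAS AND PROOFS =====

def pvAdj (h : List (String × Int)) : Int := PySem.Dict.getD (PySem.Dict.mk h) "adjustment" 0

-- flip count over a list of adjacent record pairs (A's condition)
def pvFcA : List (List (String × Int) × List (String × Int)) → Int
  | [] => 0
  | p :: t => (if (pvAdj p.1 > 0 ∧ pvAdj p.2 < 0) ∨ (pvAdj p.1 < 0 ∧ pvAdj p.2 > 0) then 1 else 0) + pvFcA t

-- flip count on a sign sequence, pairwise
def pvCntFlip : List Int → Int
  | a :: b :: t => (if a * b < 0 then 1 else 0) + pvCntFlip (b :: t)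
  | _ => 0

-- nonzero-boundary count on a run sequence, pairwise
def pvCntNZ : List Int → Int
  | a :: b :: t => (if a ≠ 0 ∧ b ≠ 0 then 1 else 0) + pvCntNZ (b :: t)
  | _ => 0

-- run-length encoding (signs of maximal runs), given the previous run's sign
def pvRleFrom (p : Int) : List Int → List Int
  | [] => []
  | s :: t => if s = p then pvRleFrom p t else s :: pvRleFrom s t

def pvIsSign (x : Int) : Prop := x = -1 ∨ x = 0 ∨ x = 1

theorem pvSignB_isSign (a : Int) : pvIsSign (pySignB a) := by
  unfold pvIsSign pySignB; split_ifs <;> omega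

theorem pvSignB_mul_neg (a b : Int) :
    pySignB a * pySignB b < 0 ↔ (a > 0 ∧ b < 0) ∨ (a < 0 ∧ b > 0) := by
  unfold pySignB
  split_ifs <;> norm_num <;> omega

theorem pvFoldlA (l : List (List (String × Int) × List (String × Int))) (init : Int) :
    l.foldl (fun f p => if (pvAdj p.1 > 0 ∧ pvAdj p.2 < 0) ∨ (pvAdj p.1 < 0 ∧ pvAdj p.2 > 0) then f + 1 else f) init
      = init + pvFcA l := by
  induction l generalizing init with
  | nil => simp [pvFcA]
  | cons p t ih => simp only [List.foldl_cons, pvFcA, ih]; split <;> omega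

-- the index pairs read by A's loop are exactly the adjacent pairs of the list
theorem pvPairs (history : List (List (String × Int))) (h : 1 ≤ history.length) :
    (PySem.List.pyRange 1 (history.length : Int) 1).map
        (fun i => (PySem.List.pyGetD history (i - 1) ([] : List (String × Int)),
                   PySem.List.pyGetD history i ([] : List (String × Int))))
      = history.zip history.tail := by
  apply List.ext_getElem
  · simp only [List.length_map, PySem.List.length_pyRange_one, List.length_zip, List.length_tail]
    omega
  · intro k hk1 hk2
    have hlen : k < history.length - 1 := by
      simp only [List.length_map, PySem.List.length_pyRange_one] at hk1
      omega
    simp only [List.getElem_map, PySem.List.getElem_pyRange_one]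
    have h1 : ((1 : Int) + k) - 1 = (k : Int) := by omega
    have h2 : (1 : Int) + k = ((k + 1 : Nat) : Int) := by push_cast; omega
    rw [h1, h2, PySem.List.pyGetD_natCast, PySem.List.pyGetD_natCast,
        List.getD_eq_getElem _ _ (by omega), List.getD_eq_getElem _ _ (by omega)]
    simp [List.getElem_zip, List.getElem_tail]

-- A's flip count over adjacent record pairs = pairwise flip count on the sign sequence
theorem pvFcA_signs (l : List (List (String × Int))) :
    pvFcA (l.zip l.tail) = pvCntFlip (l.map (fun h => pySignB (pvAdj h))) := by
  induction l with
  | nil => rfl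
  | cons a t ih =>
    cases t with
    | nil => rfl
    | cons b t2 =>
      show pvFcA ((a, b) :: ((b :: t2).zip (b :: t2).tail)) = _
      simp only [pvFcA, List.map_cons, pvCntFlip]
      rw [ih]
      congr 1
      by_cases hc : (pvAdj a > 0 ∧ pvAdj b < 0) ∨ (pvAdj a < 0 ∧ pvAdj b > 0)
      · rw [if_pos hc, if_pos ((pvSignB_mul_neg _ _).mpr hc)]
      · rw [if_neg hc, if_neg (fun hx => hc ((pvSignB_mul_neg _ _).mp hx))]

-- KEY LEMMA: flip count of a sign sequence = nonzero-boundary count of its RLE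
theorem pvRle_main (t : List Int) : ∀ p : Int, pvIsSign p → (∀ x ∈ t, pvIsSign x) →
    pvCntFlip (p :: t) = pvCntNZ (p :: pvRleFrom p t) := by
  induction t with
  | nil => intro p _ _; rfl
  | cons s t ih =>
    intro p hp hall
    have hs : pvIsSign s := hall s (by simp)
    have hall' : ∀ x ∈ t, pvIsSign x := fun x hx => hall x (by simp [hx])
    by_cases hsp : s = p
    · subst hsp
      have hns : ¬ (s * s < 0) := by nlinarith [sq_nonneg s]
      have hrle : pvRleFrom s (s :: t) = pvRleFrom s t := by simp [pvRleFrom]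
      simp only [pvCntFlip, if_neg hns, hrle]
      rw [ih s hs hall']
      omega
    · simp only [pvCntFlip, pvRleFrom, if_neg hsp, pvCntNZ]
      rw [ih s hs hall']
      congr 1
      -- on {-1,0,1} with p ≠ s:  p*s < 0  ↔  p ≠ 0 ∧ s ≠ 0
      rcases hp with hp | hp | hp <;> rcases hs with hs' | hs' | hs' <;>
        subst hp <;> subst hs' <;> simp_all

-- Source B's run-building fold = cons-style RLE
theorem pvRuns_foldl (t : List Int) : ∀ (acc : List Int) (p : Int), acc.getLast? = some p →
    t.foldl (fun runs s => if runs = [] ∨ runs.getLast? ≠ some s then runs ++ [s] else runs) acc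
      = acc ++ pvRleFrom p t := by
  induction t with
  | nil => intro acc p _; simp [pvRleFrom]
  | cons s t ih =>
    intro acc p hlast
    have hne : acc ≠ [] := by intro h; rw [h] at hlast; simp at hlast
    by_cases hsp : s = p
    · subst hsp
      have : ¬ (acc = [] ∨ acc.getLast? ≠ some s) := by
        push_neg; exact ⟨hne, by rw [hlast]⟩
      simp only [List.foldl_cons, if_neg this, pvRleFrom]
      exact ih acc s hlast
    · have : acc = [] ∨ acc.getLast? ≠ some s := by
        right; rw [hlast]; intro h; exact hsp (Option.some.inj h).symm
      simp only [List.foldl_cons, if_pos this, pvRleFrom, if_neg hsp]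
      rw [ih (acc ++ [s]) s (by simp)]
      simp
  -- note: condition `runs = [] ∨ runs.getLast? ≠ some s` matches `not runs or runs[-1] != s`

-- Source B's zip/sum pass = pairwise nonzero-boundary count
theorem pvZipNZ (l : List Int) : ∀ c : Int,
    (l.zip l.tail).foldl (fun c p => if p.1 ≠ 0 ∧ p.2 ≠ 0 then c + 1 else c) c
      = c + pvCntNZ l := by
  induction l with
  | nil => intro c; simp [pvCntNZ]
  | cons a t ih =>
    intro c
    cases t with
    | nil => simp [pvCntNZ]
    | cons b t2 =>
      show ((a, b) :: ((b :: t2).zip (b :: t2).tail)).foldl _ c = _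
      simp only [List.foldl_cons, pvCntNZ]
      rw [ih]
      split <;> omega

-- ===== VERDICT (by name: the statement is the Claim_ definition above) =====
theorem detect_byzantine_behavior_spec : Claim_equal_detect_byzantine_behavior := by
  intro agent_id history _
  unfold Spec_detect_byzantine_behavior detect_byzantine_behavior detect_byzantine_behavior_alt
  by_cases h : history.length < 4
  · simp only [if_pos h]
  · simp only [if_neg h]
    -- A's count = pvFcA of adjacent pairs
    have hA : (PySem.List.pyRange 1 (history.length : Int) 1).foldl
        (fun flips i =>
          let prev := PySem.Dict.getD (PySem.Dict.mk (PySem.List.pyGetD history (i - 1) [])) "adjustment" 0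
          let curr := PySem.Dict.getD (PySem.Dict.mk (PySem.List.pyGetD history i [])) "adjustment" 0
          if (prev > 0 ∧ curr < 0) ∨ (prev < 0 ∧ curr > 0) then flips + 1 else flips) (0 : Int)
        = pvFcA (history.zip history.tail) := by
      calc (PySem.List.pyRange 1 (history.length : Int) 1).foldl
            (fun flips i =>
              let prev := PySem.Dict.getD (PySem.Dict.mk (PySem.List.pyGetD history (i - 1) [])) "adjustment" 0
              let curr := PySem.Dict.getD (PySem.Dict.mk (PySem.List.pyGetD history i [])) "adjustment" 0
              if (prev > 0 ∧ curr < 0) ∨ (prev < 0 ∧ curr > 0) then flips + 1 else flips) (0 : Int)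
          = ((PySem.List.pyRange 1 (history.length : Int) 1).map
              (fun i => (PySem.List.pyGetD history (i - 1) ([] : List (String × Int)),
                         PySem.List.pyGetD history i ([] : List (String × Int))))).foldl
              (fun f p => if (pvAdj p.1 > 0 ∧ pvAdj p.2 < 0) ∨ (pvAdj p.1 < 0 ∧ pvAdj p.2 > 0)
                          then f + 1 else f) 0 := (List.foldl_map
                (f := fun i : Int => (PySem.List.pyGetD history (i - 1) ([] : List (String × Int)),
                                      PySem.List.pyGetD history i ([] : List (String × Int))))
                (g := fun (f : Int) (p : List (String × Int) × List (String × Int)) =>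
                        if (pvAdj p.1 > 0 ∧ pvAdj p.2 < 0) ∨ (pvAdj p.1 < 0 ∧ pvAdj p.2 > 0)
                        then f + 1 else f)
                (l := PySem.List.pyRange 1 (history.length : Int) 1)
                (init := (0 : Int))).symm
        _ = (history.zip history.tail).foldl
              (fun f p => if (pvAdj p.1 > 0 ∧ pvAdj p.2 < 0) ∨ (pvAdj p.1 < 0 ∧ pvAdj p.2 > 0)
                          then f + 1 else f) 0 := by rw [pvPairs history (by omega)]
        _ = 0 + pvFcA (history.zip history.tail) := pvFoldlA _ 0
        _ = pvFcA (history.zip history.tail) := by omega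
    -- B's runs fold = RLE of the sign sequence
    cases history with
    | nil => simp at h
    | cons h0 t0 =>
      have hrunsStep : (h0 :: t0).foldl (fun runs h =>
            let a := PySem.Dict.getD (PySem.Dict.mk h) "adjustment" 0
            let s := pySignB a
            if runs = [] ∨ runs.getLast? ≠ some s then runs ++ [s] else runs) ([] : List Int)
          = (((h0 :: t0).map (fun h => pySignB (pvAdj h)))).foldl
            (fun runs s => if runs = [] ∨ runs.getLast? ≠ some s then runs ++ [s] else runs) [] := by
        rw [List.foldl_map]
        rfl
      have hruns2 : (((h0 :: t0).map (fun h => pySignB (pvAdj h)))).foldl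
            (fun runs s => if runs = [] ∨ runs.getLast? ≠ some s then runs ++ [s] else runs) []
          = pySignB (pvAdj h0) :: pvRleFrom (pySignB (pvAdj h0)) (t0.map (fun h => pySignB (pvAdj h))) := by
        rw [List.map_cons, List.foldl_cons]
        exact pvRuns_foldl (t0.map (fun h => pySignB (pvAdj h))) [pySignB (pvAdj h0)]
          (pySignB (pvAdj h0)) rfl
      rw [hA, hrunsStep, hruns2, pvZipNZ, decide_eq_decide, pvFcA_signs, List.map_cons,
        pvRle_main _ _ (pvSignB_isSign _)
          (by intro x hx; simp only [List.mem_map] at hx; obtain ⟨y, _, hy⟩ := hx; rw [← hy]; exact pvSignB_isSign _)]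
      omega
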